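-- pv_equiv track=rewrite | github.com/YashB63/GFG-Daily-Questions | Day 324/Sort string/sort_string.py | SortedString
-- ===== SOURCE A (Python) =====
-- import itertools
--
-- def SortedString(s: str) -> str:
--     vowels = "aeiou"
--
--     vow = [sym for sym in s if sym in vowels ]
--
--     con = [sym for sym in s if sym not in vowels]
--
--     vow.sort()
--
--     con.sort()
--
--     if s[0] in vowels:
--         return "".join(sym[0] + sym[1] for sym in itertools.zip_longest(vow, con, fillvalue=""))
--
--     else:
--          return "".join(sym[1] + sym[0] for sym in itertools.zip_longest(vow, con, fillvalue=""))
-- ===== SOURCE B (Python) =====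
-- def _weave(xs, ys):
--     out = []
--     for a, b in zip(xs, ys):
--         out.append(a)
--         out.append(b)
--     k = min(len(xs), len(ys))
--     out.extend(xs[k:])
--     out.extend(ys[k:])
--     return out
--
-- def SortedString(s: str) -> str:
--     vowels = "aeiou"
--     counts = {}
--     for ch in s:
--         counts[ch] = counts.get(ch, 0) + 1
--     vow = []
--     for v in vowels:
--         vow.extend([v] * counts.get(v, 0))
--     con = []
--     for code in range(128):
--         c = chr(code)
--         if c not in vowels:
--             con.extend([c] * counts.get(c, 0))
--     if s[0] in vowels:
--         return "".join(_weave(vow, con))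
--     else:
--         return "".join(_weave(con, vow))
-- ===== Notes on version B (the rewrite author's own statement) =====
-- stated objective: alternative
-- what changed: Replaces the two comparison sorts with a single counting pass over the string (a char-frequency counter expanded over the fixed 128-code alphabet) and replaces the itertools.zip_longest/fillvalue join with a zip-then-tails interleave; intended as faster (O(n) counting vs O(n log n) sorts) and a timing run's readings at its largest size ranged from 1.3x to 2.1x, so no unqualified speed claim is made.
-- outside the precondition, e.g. on SortedString(''): A raises IndexError, B raises IndexError
import Mathlib
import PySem

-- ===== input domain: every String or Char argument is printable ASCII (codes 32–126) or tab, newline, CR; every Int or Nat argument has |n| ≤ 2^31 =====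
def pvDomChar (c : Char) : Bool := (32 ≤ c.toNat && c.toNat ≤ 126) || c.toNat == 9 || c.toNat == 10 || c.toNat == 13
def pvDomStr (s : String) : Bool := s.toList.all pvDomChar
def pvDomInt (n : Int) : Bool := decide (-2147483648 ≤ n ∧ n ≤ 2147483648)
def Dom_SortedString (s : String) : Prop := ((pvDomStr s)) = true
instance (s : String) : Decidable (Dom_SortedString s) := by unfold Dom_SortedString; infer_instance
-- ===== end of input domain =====

-- B replaces A's two comparison sorts by one counting pass expanded over the fixed 128-code
-- alphabet, and the zip_longest join by a zip-then-tails interleave (same result, different algorithm).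

-- ===== PORT A =====
-- itertools.zip_longest(vow, con, fillvalue="") on two lists of 1-char strings; a char is
-- modelled as the singleton List Char, the fill value "" as [] (exact: join concatenates).
def zipLongA : List Char → List Char → List (List Char × List Char)
  | [], [] => []
  | [], y :: ys => ([], [y]) :: zipLongA [] ys
  | x :: xs, [] => ([x], []) :: zipLongA xs []
  | x :: xs, y :: ys => ([x], [y]) :: zipLongA xs ys

-- 'sym in vowels' is a 1-char substring test = list membership (exact for single characters).
def SortedString (s : String) : String :=
  let vowels := "aeiou".toList
  let vow := PySem.List.sorted (s.toList.filter (fun c => decide (c ∈ vowels))) (fun x => x) false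
  let con := PySem.List.sorted (s.toList.filter (fun c => !decide (c ∈ vowels))) (fun x => x) false
  match PySem.Str.pyGet? s 0 with
  | none => ""  -- Python raises IndexError on s[0]; excluded by Pre_SortedString
  | some c =>
    if c ∈ vowels then
      String.ofList ((zipLongA vow con).foldl (fun acc p => acc ++ p.1 ++ p.2) [])
    else
      String.ofList ((zipLongA vow con).foldl (fun acc p => acc ++ p.2 ++ p.1) [])

-- ===== PORT B =====
-- the zip loop appending a then b, then the two tail extends (at least one of them empty)
def weaveB (xs ys : List Char) : List Char :=
  let k := min xs.length ys.length
  ((xs.zip ys).flatMap (fun p => [p.1, p.2])) ++ xs.drop k ++ ys.drop k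

def SortedString_alt (s : String) : String :=
  let vowels := "aeiou".toList
  let counts := s.toList.foldl (fun d ch => d.insert ch (d.getD ch 0 + 1))
    (PySem.Dict.empty : PySem.Dict Char Int)
  let vow := vowels.flatMap (fun v => List.replicate (counts.getD v 0).toNat v)
  let con := (PySem.List.pyRange 0 128 1).flatMap (fun code =>
      let c := Char.ofNat code.toNat
      if c ∈ vowels then [] else List.replicate (counts.getD c 0).toNat c)
  match PySem.Str.pyGet? s 0 with
  | none => ""  -- Python raises IndexError on s[0]; excluded by Pre_SortedString
  | some c =>
    if c ∈ vowels then String.ofList (weaveB vow con) else String.ofList (weaveB con vow)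

-- ===== PRECONDITION & SPEC =====
-- Both programs evaluate s[0]; on the empty string A (and B) raise IndexError.
def Pre_SortedString (s : String) : Prop := s ≠ ""
instance (s : String) : Decidable (Pre_SortedString s) := by unfold Pre_SortedString; infer_instance
def pvWitness_SortedString : String := "leetcode"

def Spec_SortedString (s : String) (out : String) : Prop := out = SortedString_alt s
instance (s : String) (out : String) : Decidable (Spec_SortedString s out) := by unfold Spec_SortedString; infer_instance

-- ===== CLAIM (what is proved, stated in full; the proofs are below) =====
def Claim_equal_SortedString : Prop := ∀ (s : String), Dom_SortedString s → Pre_SortedString s → Spec_SortedString s (SortedString s)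

-- ===== LEMMAS AND PROOFS =====

lemma weaveB_nil_left (ys : List Char) : weaveB [] ys = ys := by
  simp [weaveB]

lemma weaveB_nil_right (xs : List Char) : weaveB xs [] = xs := by
  simp [weaveB]

lemma weaveB_cons (x y : Char) (xs ys : List Char) :
    weaveB (x :: xs) (y :: ys) = x :: y :: weaveB xs ys := by
  simp [weaveB, Nat.succ_min_succ]

lemma zipA_foldl₁ : ∀ (xs ys acc : List Char),
    (zipLongA xs ys).foldl (fun a p => a ++ p.1 ++ p.2) acc = acc ++ weaveB xs ys := by
  intro xs ys
  induction xs, ys using zipLongA.induct with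
  | case1 =>
    intro acc
    simp only [zipLongA, List.foldl_nil, weaveB_nil_left, List.append_nil]
  | case2 y ys ih =>
    intro acc
    simp only [zipLongA, List.foldl_cons, ih, weaveB_nil_left]
    simp
  | case3 x xs ih =>
    intro acc
    simp only [zipLongA, List.foldl_cons, ih, weaveB_nil_right]
    simp
  | case4 x xs y ys ih =>
    intro acc
    simp only [zipLongA, List.foldl_cons, ih, weaveB_cons]
    simp

lemma zipA_foldl₂ : ∀ (xs ys acc : List Char),
    (zipLongA xs ys).foldl (fun a p => a ++ p.2 ++ p.1) acc = acc ++ weaveB ys xs := by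
  intro xs ys
  induction xs, ys using zipLongA.induct with
  | case1 =>
    intro acc
    simp only [zipLongA, List.foldl_nil, weaveB_nil_left, List.append_nil]
  | case2 y ys ih =>
    intro acc
    simp only [zipLongA, List.foldl_cons, ih, weaveB_nil_right]
    simp
  | case3 x xs ih =>
    intro acc
    simp only [zipLongA, List.foldl_cons, ih, weaveB_nil_left]
    simp
  | case4 x xs y ys ih =>
    intro acc
    simp only [zipLongA, List.foldl_cons, ih, weaveB_cons]
    simp

lemma rep_pairwise (n : Nat) (c : Char) : (List.replicate n c).Pairwise (· ≤ ·) := by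
  induction n with
  | zero => simp
  | succ m ih =>
    rw [List.replicate_succ]
    exact List.pairwise_cons.2 ⟨fun b hb => le_of_eq (List.eq_of_mem_replicate hb).symm, ih⟩

lemma expand_pairwise (cs : List Char) (n : Char → Nat) (h : cs.Pairwise (· < ·)) :
    (cs.flatMap (fun c => List.replicate (n c) c)).Pairwise (· ≤ ·) := by
  induction cs with
  | nil => simp
  | cons c cs ih =>
    rcases List.pairwise_cons.1 h with ⟨hc, hcs⟩
    rw [List.flatMap_cons]
    apply List.pairwise_append.2
    refine ⟨rep_pairwise _ _, ih hcs, ?_⟩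
    intro a ha b hb
    rw [List.eq_of_mem_replicate ha]
    obtain ⟨c', hc', hb'⟩ := List.mem_flatMap.1 hb
    rw [List.eq_of_mem_replicate hb']
    exact le_of_lt (hc c' hc')

lemma expand_count (cs : List Char) (n : Char → Nat) (h : cs.Nodup) (a : Char) :
    (cs.flatMap (fun c => List.replicate (n c) c)).count a = if a ∈ cs then n a else 0 := by
  induction cs with
  | nil => simp
  | cons c cs ih =>
    rcases List.nodup_cons.1 h with ⟨hc, hcs⟩
    rw [List.flatMap_cons, List.count_append, ih hcs]
    by_cases hac : a = c
    · subst hac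
      simp [hc]
    · have hrep : (List.replicate (n c) c).count a = 0 :=
        List.count_eq_zero.2 (fun hm => hac (List.eq_of_mem_replicate hm))
      rw [hrep]
      simp [List.mem_cons, hac]

lemma count_filter_eq (p : Char → Bool) (a : Char) (l : List Char) :
    (l.filter p).count a = if p a then l.count a else 0 := by
  by_cases h : p a <;> simp [h, List.count_filter, List.count_eq_zero]

lemma sorted_filter_eq_expand (cs xs : List Char) (p : Char → Bool)
    (h : cs.Pairwise (· < ·)) (hmem : ∀ a ∈ xs, (p a = true ↔ a ∈ cs)) :
    PySem.List.sorted (xs.filter p) (fun x => x) false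
      = cs.flatMap (fun c => List.replicate (xs.count c) c) := by
  apply PySem.List.sorted_id_eq_of_perm_of_pairwise
  · apply List.perm_iff_count.2
    intro a
    rw [expand_count cs _ (h.imp ne_of_lt) a, count_filter_eq]
    by_cases hx : a ∈ xs
    · rcases hmem a hx with ⟨h1, h2⟩
      by_cases hp : p a
      · simp [hp, h1 hp]
      · have : a ∉ cs := fun hmc => hp (h2 hmc)
        simp [hp, this]
    · have hz : xs.count a = 0 := List.count_eq_zero.2 hx
      split_ifs <;> simp [hz]
  · exact expand_pairwise cs _ h

def conChars : List Char :=
  ((List.range 128).map (fun k => Char.ofNat k)).filter (fun c => !decide (c ∈ "aeiou".toList))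

lemma pyRange128 : PySem.List.pyRange 0 128 1 = (List.range 128).map (fun k => (k : Int)) := by
  decide

lemma flatMap_map' {α β γ : Type} (L : List α) (f : α → β) (g : β → List γ) :
    (L.map f).flatMap g = L.flatMap (fun x => g (f x)) := by
  induction L with
  | nil => rfl
  | cons x L ih => simp only [List.map_cons, List.flatMap_cons, ih]

lemma flatMap_if_eq_filter (vs L : List Char) (f : Char → List Char) :
    L.flatMap (fun c => if c ∈ vs then [] else f c)
      = (L.filter (fun c => !decide (c ∈ vs))).flatMap f := by
  induction L with
  | nil => rfl
  | cons c L ih =>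
    rw [List.flatMap_cons, List.filter_cons, ih]
    by_cases h : c ∈ vs <;> simp [h]

lemma flatMap_if_filter (xs : List Char) :
    (PySem.List.pyRange 0 128 1).flatMap (fun code =>
        if Char.ofNat code.toNat ∈ "aeiou".toList then []
        else List.replicate (List.count (Char.ofNat code.toNat) xs) (Char.ofNat code.toNat))
      = conChars.flatMap (fun c => List.replicate (xs.count c) c) := by
  rw [pyRange128, conChars.eq_def, ← flatMap_if_eq_filter]
  rw [show ((List.range 128).map (fun k => (k : Int))).flatMap
      (fun code => if Char.ofNat code.toNat ∈ "aeiou".toList then []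
        else List.replicate (List.count (Char.ofNat code.toNat) xs) (Char.ofNat code.toNat))
    = (List.range 128).flatMap (fun k =>
        if Char.ofNat ((k : Int)).toNat ∈ "aeiou".toList then []
        else List.replicate (List.count (Char.ofNat ((k : Int)).toNat) xs) (Char.ofNat ((k : Int)).toNat))
    from flatMap_map' _ _ _]
  rfl

lemma pairwise_conChars : conChars.Pairwise (· < ·) := by
  decide

lemma mem_conChars (a : Char) (h : a.toNat < 128) (hv : a ∉ "aeiou".toList) : a ∈ conChars := by
  simp only [conChars, List.mem_filter, List.mem_map, List.mem_range]
  refine ⟨⟨a.toNat, h, Char.ofNat_toNat a⟩, ?_⟩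
  simpa using hv

lemma dom_char {s : String} (hd : Dom_SortedString s) {a : Char} (ha : a ∈ s.toList) :
    a.toNat < 128 := by
  simp only [Dom_SortedString, pvDomStr, List.all_eq_true] at hd
  have := hd a ha
  simp [pvDomChar] at this
  omega

-- ===== VERDICT (by name: the statement is the Claim_ definition above) =====
theorem SortedString_spec : Claim_equal_SortedString := by
  intro s hdom hpre
  unfold Spec_SortedString
  have hvow : PySem.List.sorted (s.toList.filter (fun c => decide (c ∈ "aeiou".toList))) (fun x => x) false
      = "aeiou".toList.flatMap (fun v => List.replicate (s.toList.count v) v) :=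
    sorted_filter_eq_expand _ _ _ (by decide) (fun a _ => by simp)
  have hcon : PySem.List.sorted (s.toList.filter (fun c => !decide (c ∈ "aeiou".toList))) (fun x => x) false
      = conChars.flatMap (fun c => List.replicate (s.toList.count c) c) :=
    sorted_filter_eq_expand _ _ _ pairwise_conChars (fun a ha => by
      constructor
      · intro hp
        exact mem_conChars a (dom_char hdom ha) (by simpa using hp)
      · intro hmc
        have := (List.mem_filter.1 hmc).2
        simpa using this)
  simp only [SortedString, SortedString_alt,
    PySem.Dict.foldl_insert_getD_add_one_eq_counter, PySem.Dict.getD_counter,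
    Int.toNat_natCast, flatMap_if_filter, hvow, hcon]
  cases hg : PySem.Str.pyGet? s 0 with
  | none =>
    exfalso
    have hne : s.toList ≠ [] := fun h => hpre (by
      have := congrArg String.ofList h
      simpa using this)
    cases hl : s.toList with
    | nil => exact hne hl
    | cons a l =>
      rw [PySem.Str.pyGet?, hl] at hg
      simp [PySem.List.pyGet?, PySem.List.pyIdx?] at hg
  | some c =>
    dsimp only
    split_ifs with h
    · rw [zipA_foldl₁, List.nil_append]
    · rw [zipA_foldl₂, List.nil_append]
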